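-- pv_equiv track=rewrite | github.com/Melmaphother/Science-Star | science_star/validator/gaia_scorer.py | _letters_in_order
-- ===== SOURCE A (Python) =====
-- def _letters_in_order(prediction: str, true_answer: str) -> bool:
--     prediction = prediction.lower()
--     true_answer = true_answer.lower()
--     if len(prediction) > len(true_answer) * 3:
--         return False
--     i = 0
--     for letter in true_answer:
--         if letter in prediction[i:]:
--             i += prediction[i:].index(letter)
--         else:
--             return False
--     return True
-- ===== SOURCE B (Python) =====
-- def _bisect_left(a, x):
--     lo, hi = 0, len(a)
--     while lo < hi:
--         mid = (lo + hi) // 2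
--         if a[mid] < x:
--             lo = mid + 1
--         else:
--             hi = mid
--     return lo
--
--
-- def _letters_in_order(prediction: str, true_answer: str) -> bool:
--     p = prediction.lower()
--     t = true_answer.lower()
--     if len(p) > len(t) * 3:
--         return False
--     # index every character of p once: char -> sorted list of its positions
--     pos = {}
--     for idx, ch in enumerate(p):
--         pos.setdefault(ch, []).append(idx)
--     i = 0
--     for c in t:
--         lst = pos.get(c, [])
--         k = _bisect_left(lst, i)  # first occurrence of c at position >= i
--         if k == len(lst):
--             return False
--         i = lst[k]
--     return True
-- ===== Notes on version B (the rewrite author's own statement) =====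
-- stated objective: faster
-- what changed: Instead of re-slicing and substring-searching prediction for every letter of true_answer, B builds a per-character index table of prediction (char -> increasing list of positions) in one pass and answers each letter with a bisect_left for the first occurrence at position >= i.
import Mathlib
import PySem

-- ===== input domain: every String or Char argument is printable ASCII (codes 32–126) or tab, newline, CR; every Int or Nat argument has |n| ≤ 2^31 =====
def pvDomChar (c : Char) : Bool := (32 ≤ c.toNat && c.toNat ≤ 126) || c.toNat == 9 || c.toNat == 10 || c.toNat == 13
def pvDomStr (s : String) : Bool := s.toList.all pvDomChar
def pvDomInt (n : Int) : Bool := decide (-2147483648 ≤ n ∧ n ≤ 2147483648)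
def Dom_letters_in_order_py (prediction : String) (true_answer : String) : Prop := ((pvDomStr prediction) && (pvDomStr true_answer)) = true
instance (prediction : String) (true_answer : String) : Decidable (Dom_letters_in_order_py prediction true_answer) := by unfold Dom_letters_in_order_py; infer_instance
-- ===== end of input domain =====

-- B replaces A's per-letter slice+substring search with a one-pass per-character index
-- table of prediction plus a bisect_left per letter (return-value equivalence only).

-- ===== PORT A =====
-- the 'for letter in true_answer' loop: state i; 'letter in prediction[i:]' / 'prediction[i:].index(letter)'
def pvALoop (pl : List Char) : List Char → Int → Bool
  | [], _ => true
  | c :: rest, i =>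
    match PySem.List.index? (PySem.List.slice pl (some i) none) c with
    | some j => pvALoop pl rest (i + j)
    | none => false

def letters_in_order_py (prediction : String) (true_answer : String) : Bool :=
  let pl := PySem.Chars.lower prediction.toList
  let tl := PySem.Chars.lower true_answer.toList
  if pl.length > tl.length * 3 then false
  else pvALoop pl tl 0

-- ===== PORT B =====
-- 'for idx, ch in enumerate(p): pos.setdefault(ch, []).append(idx)'
def pvBuild (pl : List Char) : PySem.Dict Char (List Int) :=
  (PySem.List.enumerate pl).foldl (fun d p => d.modify p.2 [] (· ++ [p.1])) PySem.Dict.empty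

-- the 'for c in t' loop: _bisect_left is ported as PySem.List.bisectLeft (the same standard algorithm)
def pvBLoop (pos : PySem.Dict Char (List Int)) : List Char → Int → Bool
  | [], _ => true
  | c :: rest, i =>
    let lst := pos.getD c []
    let k := PySem.List.bisectLeft lst i
    if k = lst.length then false else pvBLoop pos rest (lst.getD k 0)

def letters_in_order_py_alt (prediction : String) (true_answer : String) : Bool :=
  let pl := PySem.Chars.lower prediction.toList
  let tl := PySem.Chars.lower true_answer.toList
  if pl.length > tl.length * 3 then false
  else pvBLoop (pvBuild pl) tl 0

-- ===== PRECONDITION & SPEC =====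
def Spec_letters_in_order_py (prediction : String) (true_answer : String) (out : Bool) : Prop := out = letters_in_order_py_alt prediction true_answer
instance (prediction : String) (true_answer : String) (out : Bool) : Decidable (Spec_letters_in_order_py prediction true_answer out) := by unfold Spec_letters_in_order_py; infer_instance

-- ===== CLAIM (what is proved, stated in full; the proofs are below) =====
def Claim_equal_letters_in_order_py : Prop := ∀ (prediction : String) (true_answer : String), Dom_letters_in_order_py prediction true_answer → Spec_letters_in_order_py prediction true_answer (letters_in_order_py prediction true_answer)

-- ===== LEMMAS AND PROOFS =====

-- the positions (starting at offset n) of the occurrences of c in pl, in increasing order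
def pvOcc (n : Int) (pl : List Char) (c : Char) : List Int :=
  match pl with
  | [] => []
  | x :: xs => if x = c then n :: pvOcc (n + 1) xs c else pvOcc (n + 1) xs c

theorem pvOcc_eq_filter (pl : List Char) (c : Char) (n : Int) :
    ((PySem.List.enumerate pl n).filter (fun p => p.2 == c)).map (·.1) = pvOcc n pl c := by
  induction pl generalizing n with
  | nil => rfl
  | cons x xs ih =>
    rw [PySem.List.enumerate_cons]
    by_cases h : x = c <;> simp [pvOcc, h, ih]

theorem pvBuild_getD (pl : List Char) (c : Char) :
    (pvBuild pl).getD c [] = pvOcc 0 pl c := by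
  unfold pvBuild
  rw [show ((PySem.List.enumerate pl).foldl (fun d p => d.modify p.2 [] (· ++ [p.1])) PySem.Dict.empty)
        = (((PySem.List.enumerate pl).map (fun p => (p.2, p.1))).foldl
            (fun d p => d.modify p.1 [] (· ++ [p.2])) PySem.Dict.empty) from by rw [List.foldl_map]]
  rw [PySem.Dict.getD_foldl_modify_append, PySem.Dict.getD_empty, List.filter_map, List.map_map]
  simp only [Function.comp_def, List.nil_append]
  exact pvOcc_eq_filter pl c 0

theorem pvOcc_bounds (pl : List Char) (c : Char) (n : Int) :
    ∀ x ∈ pvOcc n pl c, n ≤ x ∧ x < n + pl.length := by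
  induction pl generalizing n with
  | nil => simp [pvOcc]
  | cons y xs ih =>
    intro x hx
    unfold pvOcc at hx
    have step : x ∈ pvOcc (n + 1) xs c → n ≤ x ∧ x < n + (y :: xs).length := by
      intro h; have := ih (n + 1) x h; simp at this ⊢; omega
    split at hx
    · rcases List.mem_cons.mp hx with rfl | h
      · simp only [List.length_cons]; push_cast; omega
      · exact step h
    · exact step hx

theorem pvOcc_pairwise (pl : List Char) (c : Char) (n : Int) :
    (pvOcc n pl c).Pairwise (· ≤ ·) := by
  induction pl generalizing n with
  | nil => simp [pvOcc]
  | cons y xs ih =>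
    unfold pvOcc
    split
    · refine List.Pairwise.cons ?_ (ih (n + 1))
      intro x hx
      have := (pvOcc_bounds xs c (n + 1) x hx).1
      omega
    · exact ih (n + 1)

theorem pvOcc_append (a b : List Char) (c : Char) (n : Int) :
    pvOcc n (a ++ b) c = pvOcc n a c ++ pvOcc (n + a.length) b c := by
  induction a generalizing n with
  | nil => simp [pvOcc]
  | cons y xs ih =>
    simp only [List.cons_append, pvOcc, ih (n + 1), List.length_cons]
    split <;> simp <;> ring_nf

theorem pvOcc_head? (pl : List Char) (c : Char) (n : Int) :
    (pvOcc n pl c).head? = (PySem.List.index? pl c).map (fun j => n + (j : Int)) := by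
  induction pl generalizing n with
  | nil => simp [pvOcc, PySem.List.index?_eq_idxOf?]
  | cons y xs ih =>
    by_cases h : y = c
    · subst h; rw [PySem.List.index?_cons_self]; simp [pvOcc]
    · rw [PySem.List.index?_cons_of_ne _ h]
      unfold pvOcc
      rw [if_neg h, ih (n + 1)]
      cases PySem.List.index? xs c with
      | none => rfl
      | some j => simp; ring

-- bisect_left on a concatenation 'all-below ++ all-at-or-above' lands exactly at the join
theorem pvBisect_split (la lb : List Int) (x : Int)
    (hp : (la ++ lb).Pairwise (· ≤ ·))
    (hA : ∀ y ∈ la, y < x) (hB : ∀ y ∈ lb, x ≤ y) :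
    PySem.List.bisectLeft (la ++ lb) x = la.length := by
  obtain ⟨hk, h1, h2⟩ := PySem.List.bisectLeft_spec (la ++ lb) x hp
  rw [List.length_append] at hk
  by_cases hle : PySem.List.bisectLeft (la ++ lb) x < la.length
  · exfalso
    have hklt : PySem.List.bisectLeft (la ++ lb) x < (la ++ lb).length := by
      rw [List.length_append]; omega
    have hmem : (la ++ lb)[PySem.List.bisectLeft (la ++ lb) x]'hklt ∈ la := by
      rw [List.getElem_append_left hle]; exact List.getElem_mem _
    exact absurd (h2 _ hklt le_rfl) (not_le.mpr (hA _ hmem))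
  · rw [not_lt] at hle
    by_contra hne
    have hlt : la.length < PySem.List.bisectLeft (la ++ lb) x := lt_of_le_of_ne hle (Ne.symm hne)
    have hlalt : la.length < (la ++ lb).length := by rw [List.length_append]; omega
    have hmem : (la ++ lb)[la.length]'hlalt ∈ lb := by
      rw [List.getElem_append_right le_rfl]
      exact List.getElem_mem _
    exact absurd (h1 _ hlalt hlt) (not_lt.mpr (hB _ hmem))

-- the step correspondence: bisecting the occurrence list of c at i = n
-- finds exactly what A's search in prediction[n:] finds
theorem pvStep (pl : List Char) (c : Char) (n : Nat) (hn : n ≤ pl.length) :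
    (PySem.List.index? (pl.drop n) c = none →
      PySem.List.bisectLeft ((pvBuild pl).getD c []) (n : Int) = ((pvBuild pl).getD c []).length) ∧
    (∀ j, PySem.List.index? (pl.drop n) c = some j →
      PySem.List.bisectLeft ((pvBuild pl).getD c []) (n : Int) < ((pvBuild pl).getD c []).length ∧
      ((pvBuild pl).getD c []).getD (PySem.List.bisectLeft ((pvBuild pl).getD c []) (n : Int)) 0
        = ((n + j : Nat) : Int)) := by
  rw [pvBuild_getD]
  have hsplit : pvOcc 0 pl c = pvOcc 0 (pl.take n) c ++ pvOcc (n : Int) (pl.drop n) c := by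
    conv_lhs => rw [← List.take_append_drop n pl]
    rw [pvOcc_append]
    simp [List.length_take, Nat.min_eq_left hn]
  have hA : ∀ x ∈ pvOcc 0 (pl.take n) c, x < (n : Int) := by
    intro x hx
    have := (pvOcc_bounds (pl.take n) c 0 x hx).2
    simp [List.length_take, Nat.min_eq_left hn] at this
    omega
  have hB : ∀ x ∈ pvOcc (n : Int) (pl.drop n) c, (n : Int) ≤ x :=
    fun x hx => (pvOcc_bounds (pl.drop n) c (n : Int) x hx).1
  have hpw : (pvOcc 0 (pl.take n) c ++ pvOcc (n : Int) (pl.drop n) c).Pairwise (· ≤ ·) := by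
    rw [← hsplit]; exact pvOcc_pairwise pl c 0
  have hbs := pvBisect_split _ _ ((n : Nat) : Int) hpw hA hB
  rw [hsplit, hbs]
  constructor
  · intro hnone
    have hBnil : pvOcc (n : Int) (pl.drop n) c = [] := by
      have := pvOcc_head? (pl.drop n) c (n : Int)
      rw [hnone] at this
      simpa using this
    rw [hBnil]
    simp
  · intro j hsome
    have hhead : (pvOcc (n : Int) (pl.drop n) c).head? = some ((n : Int) + j) := by
      rw [pvOcc_head?, hsome]; rfl
    obtain ⟨tl2, htl2⟩ : ∃ t, pvOcc (n : Int) (pl.drop n) c = ((n : Int) + j) :: t := by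
      cases hx : pvOcc (n : Int) (pl.drop n) c with
      | nil => rw [hx] at hhead; simp at hhead
      | cons a t => rw [hx] at hhead; simp at hhead; exact ⟨t, by rw [hhead]⟩
    rw [htl2]
    refine ⟨by simp, ?_⟩
    rw [List.getD_eq_getElem _ _ (by simp)]
    rw [List.getElem_append_right le_rfl]
    simp

theorem pvLoop_eq (pl : List Char) (tl : List Char) (n : Nat) (hn : n ≤ pl.length) :
    pvALoop pl tl (n : Int) = pvBLoop (pvBuild pl) tl n := by
  induction tl generalizing n with
  | nil => rfl
  | cons c rest ih =>
    unfold pvALoop pvBLoop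
    rw [PySem.List.slice_from_natCast]
    obtain ⟨hnone, hsome⟩ := pvStep pl c n hn
    cases h : PySem.List.index? (pl.drop n) c with
    | none =>
      simp only []
      rw [if_pos (hnone h)]
    | some j =>
      obtain ⟨hlt, hval⟩ := hsome j h
      simp only []
      rw [if_neg (by omega), hval]
      have hjlt : n + j < pl.length := by
        obtain ⟨hk, -, -⟩ := PySem.List.getElem_of_index?_eq_some h
        rw [List.length_drop] at hk
        omega
      rw [show ((n : Int) + (j : Int)) = ((n + j : Nat) : Int) by push_cast; ring]
      exact ih (n + j) (by omega)

-- ===== VERDICT (by name: the statement is the Claim_ definition above) =====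
theorem letters_in_order_py_spec : Claim_equal_letters_in_order_py := by
  intro p t _
  unfold Spec_letters_in_order_py letters_in_order_py letters_in_order_py_alt
  simp only []
  split
  · rfl
  · exact_mod_cast pvLoop_eq _ _ 0 (by omega)
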